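-- pv_equiv track=rewrite | github.com/skochv04/algorithms-and-data-structures | BeforeExam 2 - Greedy algorithms/12 dishonest sellers.py | dishonest_sellers
-- ===== SOURCE A (Python) =====
-- def dishonest_sellers(n, k, a, b):
--     T = []
--     for i in range(n):
--         T.append((a[i] - b[i], i))
--     T.sort(key=lambda x: x[0])
--     sum = 0
--     for i in range(k):
--         sum += a[T[i][1]]
--     i = k
--     while i < n and T[i][0] <= 0:
--         sum += a[T[i][1]]
--         i += 1
--     for j in range(i, n):
--         sum += b[T[j][1]]
--     return sum
-- ===== SOURCE B (Python) =====
-- def _sel_sum(L, m):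
--     # sum of the m smallest elements of L, quickselect-style (three-way partition,
--     # middle-element pivot); no sorting anywhere
--     if m <= 0:
--         return 0
--     if m >= len(L):
--         return sum(L)
--     p = L[len(L) // 2]
--     lt = [x for x in L if x < p]
--     if m <= len(lt):
--         return _sel_sum(lt, m)
--     gt = [x for x in L if x > p]
--     e = len(L) - len(lt) - len(gt)
--     if m <= len(lt) + e:
--         return sum(lt) + p * (m - len(lt))
--     return sum(lt) + p * e + _sel_sum(gt, m - len(lt) - e)
--
--
-- def dishonest_sellers(n, k, a, b):
--     # total = sum of discounted prices + the m smallest (a[i]-b[i]) differences,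
--     # where m = max(k, number of non-positive differences); the m smallest are
--     # found by quickselect, not by sorting
--     diffs = [a[i] - b[i] for i in range(n)]
--     m = max(k, sum(1 for d in diffs if d <= 0))
--     return sum(b[i] for i in range(n)) + _sel_sum(diffs, m)
-- ===== Notes on version B (the rewrite author's own statement) =====
-- stated objective: alternative
-- what changed: A builds (diff,index) pairs, fully sorts them and walks three index loops over the sorted array; B never sorts: it computes m = max(k, count of non-positive diffs) and obtains the sum of the m smallest diffs by a recursive quickselect (three-way partition around a middle pivot), adding it to sum(b).
-- intended difference: On inputs with n > 0 and -n <= k < 0, A returns a total computed through Python's negative-index wraparound into the sorted array (some sellers' prices are counted twice, e.g. A returns 6 on (2, -1, [5, 3], [4, 1])); B returns sum(b) plus all non-positive diffs (5 there), the value the greedy task intends when no full-price purchase is forced. — e.g. on dishonest_sellers(2, -1, [5, 3], [4, 1]): A returns 6, B returns 5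
import Mathlib
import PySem

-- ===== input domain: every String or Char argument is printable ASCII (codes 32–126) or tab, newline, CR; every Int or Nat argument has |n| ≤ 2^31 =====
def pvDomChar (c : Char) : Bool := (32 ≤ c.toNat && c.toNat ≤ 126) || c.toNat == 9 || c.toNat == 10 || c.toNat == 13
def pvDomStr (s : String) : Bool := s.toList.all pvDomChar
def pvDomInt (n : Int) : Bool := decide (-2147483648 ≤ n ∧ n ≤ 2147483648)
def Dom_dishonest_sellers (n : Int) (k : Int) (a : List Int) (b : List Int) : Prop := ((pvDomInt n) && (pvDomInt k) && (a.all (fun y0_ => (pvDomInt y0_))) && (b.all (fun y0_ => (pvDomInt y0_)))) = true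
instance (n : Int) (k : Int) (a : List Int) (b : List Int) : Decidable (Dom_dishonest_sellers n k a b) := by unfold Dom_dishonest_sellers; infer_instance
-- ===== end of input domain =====

-- B replaces A's full sort of (diff,index) pairs and three index loops by a
-- quickselect (three-way partition, no sorting) for the sum of the m smallest
-- diffs plus sum(b) (objective: alternative).

-- ===== PORT A =====
-- the while loop of A: while i < n and T[i][0] <= 0: sum += a[T[i][1]]; i += 1
-- returns the final (sum, i)
-- fuel = n - i at entry, so fuel 0 only occurs with i ≥ n, where the loop stops anyway
def dsWhile (n : Int) (a : List Int) (T : List (Int × Int)) (fuel : Nat) (i : Int) (s : Int) : Int × Int :=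
  match fuel with
  | 0 => (s, i)
  | fuel + 1 =>
    if i < n ∧ (PySem.List.pyGetD T i (0, 0)).1 ≤ 0 then
      dsWhile n a T fuel (i + 1) (s + PySem.List.pyGetD a (PySem.List.pyGetD T i (0, 0)).2 0)
    else (s, i)

def dishonest_sellers (n : Int) (k : Int) (a : List Int) (b : List Int) : Int :=
  -- T = []; for i in range(n): T.append((a[i]-b[i], i)); T.sort(key=fst)
  let T : List (Int × Int) :=
    (PySem.List.pyRange 0 n 1).foldl
      (fun acc i => acc ++ [(PySem.List.pyGetD a i 0 - PySem.List.pyGetD b i 0, i)]) []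
  let T := PySem.List.sorted T (fun x => x.1) false
  -- sum = 0; for i in range(k): sum += a[T[i][1]]
  let s : Int :=
    (PySem.List.pyRange 0 k 1).foldl
      (fun s i => s + PySem.List.pyGetD a (PySem.List.pyGetD T i (0, 0)).2 0) 0
  -- i = k; while i < n and T[i][0] <= 0: …
  let p := dsWhile n a T (n - k).toNat k s
  -- for j in range(i, n): sum += b[T[j][1]]
  (PySem.List.pyRange p.2 n 1).foldl
    (fun s j => s + PySem.List.pyGetD b (PySem.List.pyGetD T j (0, 0)).2 0) p.1

-- ===== PORT B =====
-- _sel_sum(L, m): sum of the m smallest elements of L, quickselect-style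
-- (three-way partition around the middle element; all indices are in range,
-- so Python's L[len(L)//2] is the plain getD)
def dsSelSum (L : List Int) (m : Int) : Int :=
  if m ≤ 0 then 0
  else if (L.length : Int) ≤ m then L.sum
  else
    let p := L.getD (L.length / 2) 0
    let lt := L.filter (fun x => decide (x < p))
    if m ≤ (lt.length : Int) then dsSelSum lt m
    else
      let gt := L.filter (fun x => decide (p < x))
      let e : Int := (L.length : Int) - (lt.length : Int) - (gt.length : Int)
      if m ≤ (lt.length : Int) + e then lt.sum + p * (m - (lt.length : Int))
      else lt.sum + p * e + dsSelSum gt (m - (lt.length : Int) - e)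
termination_by L.length
decreasing_by
  all_goals {
    have hL0 : 0 < L.length := by omega
    have hidx : L.length / 2 < L.length := Nat.div_lt_self hL0 (by norm_num)
    have hpmem : L.getD (L.length / 2) 0 ∈ L := by
      rw [List.getD_eq_getElem _ _ hidx]; exact List.getElem_mem hidx
    rw [List.length_unattach]
    refine lt_of_lt_of_le ?_ (le_of_eq List.length_attach)
    rw [List.length_filter_lt_length_iff_exists]
    exact ⟨⟨L.getD (L.length / 2) 0, hpmem⟩, List.mem_attach _ _, by simp⟩
  }

def dishonest_sellers_alt (n : Int) (k : Int) (a : List Int) (b : List Int) : Int :=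
  -- diffs = [a[i] - b[i] for i in range(n)]
  let diffs := (PySem.List.pyRange 0 n 1).map
    (fun i => PySem.List.pyGetD a i 0 - PySem.List.pyGetD b i 0)
  -- m = max(k, sum(1 for d in diffs if d <= 0))
  let m := max k ((diffs.countP (fun d => decide (d ≤ 0)) : Int))
  -- sum(b[i] for i in range(n)) + _sel_sum(diffs, m)
  ((PySem.List.pyRange 0 n 1).map (fun i => PySem.List.pyGetD b i 0)).sum + dsSelSum diffs m

-- ===== PRECONDITION & SPEC =====
-- Pre_ is exactly where the Python A returns: for n > 0 it needs n prices in a and b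
-- and -n ≤ k ≤ n (otherwise an IndexError), for n ≤ 0 it needs n ≤ k ≤ 0.
def Pre_dishonest_sellers (n : Int) (k : Int) (a : List Int) (b : List Int) : Prop :=
  (0 < n ∧ n ≤ a.length ∧ n ≤ b.length ∧ -n ≤ k ∧ k ≤ n) ∨ (n ≤ 0 ∧ n ≤ k ∧ k ≤ 0)
instance (n : Int) (k : Int) (a : List Int) (b : List Int) : Decidable (Pre_dishonest_sellers n k a b) := by unfold Pre_dishonest_sellers; infer_instance

def pvWitness_dishonest_sellers : Int × Int × List Int × List Int := (3, 1, [5, 3, 7], [4, 1, 9])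

-- On n > 0 with negative k, A returns a value produced by Python's negative-index
-- wraparound into T (some sellers are counted twice); B returns sum(b) plus all
-- non-positive discounts, the value the greedy task intends when no purchase is forced.
def D_dishonest_sellers (n : Int) (k : Int) (a : List Int) (b : List Int) : Prop :=
  0 < n ∧ k < 0
instance (n : Int) (k : Int) (a : List Int) (b : List Int) : Decidable (D_dishonest_sellers n k a b) := by unfold D_dishonest_sellers; infer_instance

def Spec_dishonest_sellers (n : Int) (k : Int) (a : List Int) (b : List Int) (out : Int) : Prop := ¬ D_dishonest_sellers n k a b → out = dishonest_sellers_alt n k a b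
instance (n : Int) (k : Int) (a : List Int) (b : List Int) (out : Int) : Decidable (Spec_dishonest_sellers n k a b out) := by unfold Spec_dishonest_sellers; infer_instance

def pvDiffWitness_dishonest_sellers : Int × Int × List Int × List Int := (2, -1, [5, 3], [4, 1])
def pvDiffWitnessOut_dishonest_sellers : Int × Int := (6, 5)

-- ===== CLAIM (what is proved, stated in full; the proofs are below) =====
def Claim_unchanged_dishonest_sellers : Prop := ∀ (n : Int) (k : Int) (a : List Int) (b : List Int), Dom_dishonest_sellers n k a b → Pre_dishonest_sellers n k a b → Spec_dishonest_sellers n k a b (dishonest_sellers n k a b)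
def Claim_changed_dishonest_sellers : Prop := Dom_dishonest_sellers (pvDiffWitness_dishonest_sellers.1) (pvDiffWitness_dishonest_sellers.2.1) (pvDiffWitness_dishonest_sellers.2.2.1) (pvDiffWitness_dishonest_sellers.2.2.2) ∧ Pre_dishonest_sellers (pvDiffWitness_dishonest_sellers.1) (pvDiffWitness_dishonest_sellers.2.1) (pvDiffWitness_dishonest_sellers.2.2.1) (pvDiffWitness_dishonest_sellers.2.2.2) ∧ D_dishonest_sellers (pvDiffWitness_dishonest_sellers.1) (pvDiffWitness_dishonest_sellers.2.1) (pvDiffWitness_dishonest_sellers.2.2.1) (pvDiffWitness_dishonest_sellers.2.2.2) ∧ dishonest_sellers (pvDiffWitness_dishonest_sellers.1) (pvDiffWitness_dishonest_sellers.2.1) (pvDiffWitness_dishonest_sellers.2.2.1) (pvDiffWitness_dishonest_sellers.2.2.2) = pvDiffWitnessOut_dishonest_sellers.1 ∧ dishonest_sellers_alt (pvDiffWitness_dishonest_sellers.1) (pvDiffWitness_dishonest_sellers.2.1) (pvDiffWitness_dishonest_sellers.2.2.1) (pvDiffWitness_dishonest_sellers.2.2.2) = pvDiffWitnessOut_dishonest_sellers.2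 ∧ pvDiffWitnessOut_dishonest_sellers.1 ≠ pvDiffWitnessOut_dishonest_sellers.2

-- ===== LEMMAS AND PROOFS =====

-- the list of diffs a[i]-b[i] for i in range(n), and related proof-only abbreviations
def pvDiffList (n : Int) (a b : List Int) : List Int :=
  (PySem.List.pyRange 0 n 1).map (fun i => PySem.List.pyGetD a i 0 - PySem.List.pyGetD b i 0)
def pvBsum (n : Int) (b : List Int) : Int :=
  ((PySem.List.pyRange 0 n 1).map (fun i => PySem.List.pyGetD b i 0)).sum
def pvNonpos (n : Int) (a b : List Int) : List Int :=
  (pvDiffList n a b).filter (fun d => decide (d ≤ 0))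
def pvM (n k : Int) (a b : List Int) : Nat := max k.toNat (pvNonpos n a b).length
-- the common normal form both programs are reduced to
def pvNF (n k : Int) (a b : List Int) : Int :=
  pvBsum n b + (((PySem.List.sorted (pvDiffList n a b) (fun x => x) false)).take (pvM n k a b)).sum

-- for a (fst-)sorted list, position j is non-positive in fst iff j is below the takeWhile length
lemma tw_char (S : List (Int × Int)) (hS : S.Pairwise (fun x y => x.1 ≤ y.1))
    (j : Nat) (hj : j < S.length) :
    S[j].1 ≤ 0 ↔ j < (S.takeWhile (fun p => decide (p.1 ≤ 0))).length := by
  induction S generalizing j with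
  | nil => simp at hj
  | cons x t ih =>
    rw [List.pairwise_cons] at hS
    obtain ⟨hx, ht⟩ := hS
    by_cases hx0 : x.1 ≤ 0
    · cases j with
      | zero => simpa [List.takeWhile_cons, hx0] using hx0
      | succ j =>
        have hj' : j < t.length := by simpa using hj
        simpa [List.takeWhile_cons, hx0, Nat.succ_lt_succ_iff] using ih ht j hj'
    · have hfalse : ¬ (x :: t)[j].1 ≤ 0 := by
        cases j with
        | zero => simpa using hx0
        | succ j =>
          have hj' : j < t.length := by simpa using hj
          have := hx t[j] (List.getElem_mem hj')
          simp only [List.getElem_cons_succ]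
          omega
      simp [hx0, hfalse]

-- for a (fst-)sorted list the takeWhile length is the count of non-positive fsts
lemma tw_len_eq_countP (S : List (Int × Int)) (hS : S.Pairwise (fun x y => x.1 ≤ y.1)) :
    (S.takeWhile (fun p => decide (p.1 ≤ 0))).length = S.countP (fun p => decide (p.1 ≤ 0)) := by
  induction S with
  | nil => simp
  | cons x t ih =>
    rw [List.pairwise_cons] at hS
    obtain ⟨hx, ht⟩ := hS
    by_cases hx0 : x.1 ≤ 0
    · simp [List.takeWhile_cons, List.countP_cons, hx0, ih ht]
    · have : t.countP (fun p => decide (p.1 ≤ 0)) = 0 := by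
        rw [List.countP_eq_zero]
        intro y hy
        have := hx y hy
        simp only [decide_eq_true_eq]
        omega
      simp [List.takeWhile_cons, List.countP_cons, hx0, this]

-- the while loop of A on a sorted list: runs from j up to max j c, summing a-lookups
lemma dsWhile_spec (a : List Int) (S : List (Int × Int))
    (hS : S.Pairwise (fun x y => x.1 ≤ y.1)) :
    ∀ (fuel : Nat) (j : Nat) (s : Int), fuel = S.length - j →
      dsWhile (S.length : Int) a S fuel (j : Int) s =
        (s + (((S.take (max j (S.takeWhile (fun p => decide (p.1 ≤ 0))).length)).drop j).map
            (fun p => PySem.List.pyGetD a p.2 0)).sum,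
         ((max j (S.takeWhile (fun p => decide (p.1 ≤ 0))).length : Nat) : Int)) := by
  intro fuel
  have hc_le : (S.takeWhile (fun p => decide (p.1 ≤ 0))).length ≤ S.length :=
    (List.takeWhile_prefix _).length_le
  induction fuel with
  | zero =>
    intro j s hfuel
    have hj : S.length ≤ j := by omega
    have hmax : max j (S.takeWhile (fun p => decide (p.1 ≤ 0))).length = j :=
      Nat.max_eq_left (by omega)
    have hnil : (S.take j).drop j = [] :=
      List.drop_eq_nil_of_le (le_trans (List.length_take_le _ _) le_rfl)
    rw [dsWhile, hmax, hnil]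
    simp
  | succ f ih =>
    intro j s hfuel
    have hj : j < S.length := by omega
    have hget : PySem.List.pyGetD S (j : Int) (0, 0) = S[j] := by
      rw [PySem.List.pyGetD_eq_getElem S (0, 0) (Int.natCast_nonneg j) (by exact_mod_cast hj)]
      simp
    rw [dsWhile]
    by_cases hP : S[j].1 ≤ 0
    · rw [if_pos ⟨by exact_mod_cast hj, by rw [hget]; exact hP⟩]
      have hjc : j < (S.takeWhile (fun p => decide (p.1 ≤ 0))).length := (tw_char S hS j hj).mp hP
      have hcast : ((j : Int) + 1) = ((j + 1 : Nat) : Int) := by push_cast; ring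
      rw [hget, hcast, ih (j + 1) _ (by omega)]
      have hmax1 : max (j + 1) (S.takeWhile (fun p => decide (p.1 ≤ 0))).length
          = (S.takeWhile (fun p => decide (p.1 ≤ 0))).length := Nat.max_eq_right (by omega)
      have hmax0 : max j (S.takeWhile (fun p => decide (p.1 ≤ 0))).length
          = (S.takeWhile (fun p => decide (p.1 ≤ 0))).length := Nat.max_eq_right (by omega)
      rw [hmax1, hmax0]
      have hlt : j < (S.take (S.takeWhile (fun p => decide (p.1 ≤ 0))).length).length := by
        rw [List.length_take]; omega
      rw [show (S.take (S.takeWhile (fun p => decide (p.1 ≤ 0))).length).drop j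
            = (S.take (S.takeWhile (fun p => decide (p.1 ≤ 0))).length)[j]
              :: (S.take (S.takeWhile (fun p => decide (p.1 ≤ 0))).length).drop (j + 1)
          from List.drop_eq_getElem_cons hlt]
      simp only [List.map_cons, List.sum_cons, List.getElem_take, Prod.mk.injEq]
      and_intros <;> first | trivial | (push_cast; omega) | abel | simp
    · rw [if_neg (by rw [hget]; rintro ⟨-, hp⟩; exact hP hp)]
      have hjc : (S.takeWhile (fun p => decide (p.1 ≤ 0))).length ≤ j := by
        by_contra hlt
        exact hP ((tw_char S hS j hj).mpr (by omega))
      have hmax : max j (S.takeWhile (fun p => decide (p.1 ≤ 0))).length = j :=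
        Nat.max_eq_left hjc
      have hnil : (S.take j).drop j = [] :=
        List.drop_eq_nil_of_le (List.length_take_le _ _)
      rw [hmax, hnil]
      simp

-- a range-indexed summing loop over a list is a sum over a take/drop window
lemma foldl_pyRange_getD_sum (S : List (Int × Int)) (f : Int × Int → Int)
    (u v : Nat) (hv : v ≤ S.length) (init : Int) :
    (PySem.List.pyRange (u : Int) (v : Int) 1).foldl
        (fun s i => s + f (PySem.List.pyGetD S i (0, 0))) init
      = init + (((S.take v).drop u).map f).sum := by
  have hlist : (PySem.List.pyRange (u : Int) (v : Int) 1).map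
      (fun i => PySem.List.pyGetD S i (0, 0)) = (S.take v).drop u := by
    apply List.ext_getElem
    · simp [PySem.List.length_pyRange_one]
      omega
    · intro t h1 h2
      have hlen : (PySem.List.pyRange (u : Int) (v : Int) 1).length = v - u := by
        rw [PySem.List.length_pyRange_one]; omega
      have htv : u + t < v := by rw [List.length_map, hlen] at h1; omega
      rw [List.getElem_map, PySem.List.getElem_pyRange_one]
      have hcast : (u : Int) + (t : Int) = ((u + t : Nat) : Int) := by push_cast; ring
      rw [hcast, PySem.List.pyGetD_eq_getElem S (0, 0) (Int.natCast_nonneg _)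
        (by exact_mod_cast lt_of_lt_of_le htv hv)]
      simp only [Int.toNat_natCast]
      rw [List.getElem_drop, List.getElem_take]
  rw [PySem.List.foldl_add]
  congr 1
  rw [← hlist, List.map_map]
  rfl

-- sums over Int-valued maps split pointwise
lemma sum_map_add_pair (l : List (Int × Int)) (f g : Int × Int → Int) :
    (l.map (fun x => f x + g x)).sum = (l.map f).sum + (l.map g).sum := by
  induction l with
  | nil => simp
  | cons x t ih => simp [ih]; ring

-- A evaluates to the normal form
lemma A_val (n k : Int) (a b : List Int)
    (hk0 : 0 ≤ k) (hkn : k ≤ n) (hna : n ≤ a.length) (hnb : n ≤ b.length) :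
    dishonest_sellers n k a b = pvNF n k a b := by
  have hn0 : 0 ≤ n := le_trans hk0 hkn
  simp only [dishonest_sellers, PySem.List.foldl_append_singleton_eq_map, List.nil_append]
  set T0 : List (Int × Int) := (PySem.List.pyRange 0 n 1).map
      (fun i => (PySem.List.pyGetD a i 0 - PySem.List.pyGetD b i 0, i)) with hT0
  set S : List (Int × Int) := PySem.List.sorted T0 (fun x => x.1) false with hSdef
  have hpair : S.Pairwise (fun x y : Int × Int => x.1 ≤ y.1) := by
    simpa using PySem.List.sorted_pairwise T0 (fun x : Int × Int => x.1)
  have hperm : S.Perm T0 := PySem.List.sorted_perm T0 (fun x : Int × Int => x.1) false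
  have hlenS : S.length = n.toNat := by
    rw [hSdef, PySem.List.length_sorted, hT0, List.length_map, PySem.List.length_pyRange_one]
    omega
  have hnS : n = (S.length : Int) := by rw [hlenS]; omega
  set c : Nat := (S.takeWhile (fun p => decide (p.1 ≤ 0))).length with hcdef
  set m : Nat := max k.toNat c with hmdef
  -- loop 1
  have hv1 : k.toNat ≤ S.length := by omega
  have h1 : (PySem.List.pyRange 0 k 1).foldl
      (fun s i => s + PySem.List.pyGetD a (PySem.List.pyGetD S i (0, 0)).2 0) 0
      = 0 + (((S.take k.toNat).drop 0).map (fun p => PySem.List.pyGetD a p.2 0)).sum := by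
    have := foldl_pyRange_getD_sum S (fun p => PySem.List.pyGetD a p.2 0) 0 k.toNat hv1 0
    simpa [show ((k.toNat : Nat) : Int) = k by omega] using this
  rw [h1]
  -- while loop
  have h2 : dsWhile n a S (n - k).toNat k
        (0 + (((S.take k.toNat).drop 0).map (fun p => PySem.List.pyGetD a p.2 0)).sum)
      = (0 + (((S.take k.toNat).drop 0).map (fun p => PySem.List.pyGetD a p.2 0)).sum
          + (((S.take m).drop k.toNat).map (fun p => PySem.List.pyGetD a p.2 0)).sum,
         ((m : Nat) : Int)) := by
    have := dsWhile_spec a S hpair (n - k).toNat k.toNat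
        (0 + (((S.take k.toNat).drop 0).map (fun p => PySem.List.pyGetD a p.2 0)).sum)
        (by omega)
    rw [show ((k.toNat : Nat) : Int) = k from by omega, ← hnS, ← hcdef, ← hmdef] at this
    exact this
  rw [h2]
  -- loop 3
  have h3 : (PySem.List.pyRange (((m : Nat) : Int)) n 1).foldl
      (fun s j => s + PySem.List.pyGetD b (PySem.List.pyGetD S j (0, 0)).2 0)
      (0 + (((S.take k.toNat).drop 0).map (fun p => PySem.List.pyGetD a p.2 0)).sum
        + (((S.take m).drop k.toNat).map (fun p => PySem.List.pyGetD a p.2 0)).sum)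
      = (0 + (((S.take k.toNat).drop 0).map (fun p => PySem.List.pyGetD a p.2 0)).sum
        + (((S.take m).drop k.toNat).map (fun p => PySem.List.pyGetD a p.2 0)).sum)
        + (((S.take S.length).drop m).map (fun p => PySem.List.pyGetD b p.2 0)).sum := by
    have := foldl_pyRange_getD_sum S (fun p => PySem.List.pyGetD b p.2 0) m S.length le_rfl
        (0 + (((S.take k.toNat).drop 0).map (fun p => PySem.List.pyGetD a p.2 0)).sum
          + (((S.take m).drop k.toNat).map (fun p => PySem.List.pyGetD a p.2 0)).sum)
    rw [← hnS] at this
    exact this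
  rw [h3]
  simp only [List.drop_zero, List.take_length, zero_add]
  -- now pure list algebra
  have hsum1 : ((S.take k.toNat).map (fun p => PySem.List.pyGetD a p.2 0)).sum
      + (((S.take m).drop k.toNat).map (fun p => PySem.List.pyGetD a p.2 0)).sum
      = ((S.take m).map (fun p => PySem.List.pyGetD a p.2 0)).sum := by
    conv_rhs => rw [← List.take_append_drop k.toNat (S.take m)]
    rw [List.map_append, List.sum_append, List.take_take,
      Nat.min_eq_left (le_max_left _ _)]
  have haL : ∀ p ∈ S, PySem.List.pyGetD a p.2 0 = PySem.List.pyGetD b p.2 0 + p.1 := by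
    intro p hp
    have hp' : p ∈ T0 := (PySem.List.mem_sorted T0 (fun x : Int × Int => x.1) false p).mp hp
    rw [hT0] at hp'
    obtain ⟨i, _, rfl⟩ := List.mem_map.mp hp'
    simp
  have hsum2 : ((S.take m).map (fun p => PySem.List.pyGetD a p.2 0)).sum
      = ((S.take m).map (fun p => PySem.List.pyGetD b p.2 0)).sum
        + ((S.take m).map (fun p => p.1)).sum := by
    rw [List.map_congr_left (fun p hp => haL p (List.mem_of_mem_take hp)),
      sum_map_add_pair]
  have hsum3 : ((S.take m).map (fun p => PySem.List.pyGetD b p.2 0)).sum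
      + ((S.drop m).map (fun p => PySem.List.pyGetD b p.2 0)).sum
      = (S.map (fun p => PySem.List.pyGetD b p.2 0)).sum := by
    rw [← List.sum_append, ← List.map_append, List.take_append_drop]
  have hsum4 : (S.map (fun p => PySem.List.pyGetD b p.2 0)).sum = pvBsum n b := by
    rw [List.Perm.sum_eq (hperm.map (fun p => PySem.List.pyGetD b p.2 0)), hT0,
      List.map_map]
    rfl
  have hD : PySem.List.sorted (pvDiffList n a b) (fun x => x) false
      = S.map (fun p => p.1) := by
    apply PySem.List.sorted_id_eq_of_perm_of_pairwise
    · have := hperm.map (fun p : Int × Int => p.1)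
      rw [hT0, List.map_map] at this
      exact this
    · simpa using PySem.List.sorted_map_key_pairwise T0 (fun x : Int × Int => x.1)
  have hc : (pvNonpos n a b).length = c := by
    rw [hcdef, tw_len_eq_countP S hpair,
      List.Perm.countP_eq _ hperm, hT0, List.countP_map]
    unfold pvNonpos
    rw [← List.countP_eq_length_filter]
    unfold pvDiffList
    rw [List.countP_map]
    rfl
  have hm : pvM n k a b = m := by
    rw [pvM, hc, hmdef]
  unfold pvNF
  rw [hD, hm, ← List.map_take]
  linarith [hsum1, hsum2, hsum3, hsum4]

-- quickselect computes the sum of the m smallest elements: strong induction on length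
lemma dsSelSum_eq : ∀ (N : Nat) (L : List Int), L.length ≤ N → ∀ m : Int,
    dsSelSum L m = ((PySem.List.sorted L (fun x => x) false).take m.toNat).sum := by
  intro N
  induction N with
  | zero =>
    intro L hL m
    have hLnil : L = [] := List.length_eq_zero_iff.mp (by omega)
    subst hLnil
    rw [dsSelSum]
    split_ifs with h1 h2
    · simp [show m.toNat = 0 by omega]
    · simp [PySem.List.sorted]
    · exfalso
      simp only [List.length_nil, Nat.cast_zero] at h2
      omega
  | succ N ih =>
    intro L hL m
    rw [dsSelSum]
    by_cases h0 : m ≤ 0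
    · rw [if_pos h0]
      have : m.toNat = 0 := by omega
      simp [this]
    · rw [if_neg h0]
      by_cases hlen : (L.length : Int) ≤ m
      · rw [if_pos hlen]
        have hle : (PySem.List.sorted L (fun x => x) false).length ≤ m.toNat := by
          rw [PySem.List.length_sorted]; omega
        rw [List.take_of_length_le hle]
        exact ((PySem.List.sorted_perm L (fun x => x) false).sum_eq).symm
      · rw [if_neg hlen]
        have hL0 : 0 < L.length := by omega
        have hidx : L.length / 2 < L.length := Nat.div_lt_self hL0 (by norm_num)
        set p := L.getD (L.length / 2) 0 with hp
        have hpmem : p ∈ L := by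
          rw [hp, List.getD_eq_getElem _ _ hidx]; exact List.getElem_mem hidx
        set lt := L.filter (fun x => decide (x < p)) with hlt
        set gt := L.filter (fun x => decide (p < x)) with hgt
        set eN := L.count p with heN
        -- the three-way split permutation
        have hperm1 : (lt ++ L.filter (fun x => ! decide (x < p))).Perm L :=
          List.filter_append_perm _ L
        have hmid : (L.filter (fun x => ! decide (x < p))).filter (fun x => x == p)
            = List.replicate eN p := by
          rw [List.filter_filter]
          have : ∀ x ∈ L, ((x == p) && ! decide (x < p)) = (x == p) := by
            intro x _
            by_cases hxe : x = p
            · subst hxe; simp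
            · simp [hxe]
          rw [List.filter_congr this, heN]
          exact List.filter_beq p
        have hhigh : (L.filter (fun x => ! decide (x < p))).filter (fun x => ! (x == p))
            = gt := by
          rw [List.filter_filter, hgt]
          apply List.filter_congr
          intro x _
          by_cases hxe : x = p
          · subst hxe; simp
          · by_cases hxl : x < p
            · have hnp : ¬ p < x := by omega
              simp [hxl, hnp]
            · have hpx : p < x := by
                rcases lt_or_eq_of_le (not_lt.mp hxl) with h | h
                · exact h
                · exact absurd h.symm hxe
              simp [hxe, hxl, hpx]
        have hperm2 : (List.replicate eN p ++ gt).Perm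
            (L.filter (fun x => ! decide (x < p))) := by
          rw [← hmid, ← hhigh]
          exact List.filter_append_perm _ _
        have hperm : (lt ++ (List.replicate eN p ++ gt)).Perm L :=
          ((List.Perm.refl lt).append hperm2).trans hperm1
        have hlenE : L.length = lt.length + eN + gt.length := by
          have := hperm.length_eq
          simp only [List.length_append, List.length_replicate] at this
          omega
        -- sorted L splits into sorted lt ++ replicate eN p ++ sorted gt
        have hsplit : PySem.List.sorted L (fun x => x) false
            = PySem.List.sorted lt (fun x => x) false
              ++ (List.replicate eN p ++ PySem.List.sorted gt (fun x => x) false) := by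
          apply PySem.List.sorted_id_eq_of_perm_of_pairwise
          · exact ((PySem.List.sorted_perm lt (fun x => x) false).append
              ((List.Perm.refl _).append
                (PySem.List.sorted_perm gt (fun x => x) false))).trans hperm
          · rw [List.pairwise_append, List.pairwise_append]
            have hltmem : ∀ x ∈ PySem.List.sorted lt (fun x => x) false, x < p := by
              intro x hx
              have := (PySem.List.mem_sorted lt (fun x => x) false x).mp hx
              rw [hlt] at this
              simpa using (List.mem_filter.mp this).2
            have hgtmem : ∀ x ∈ PySem.List.sorted gt (fun x => x) false, p < x := by
              intro x hx
              have := (PySem.List.mem_sorted gt (fun x => x) false x).mp hx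
              rw [hgt] at this
              simpa using (List.mem_filter.mp this).2
            refine ⟨by simpa using PySem.List.sorted_pairwise lt (fun x : Int => x),
              ⟨?_, by simpa using PySem.List.sorted_pairwise gt (fun x : Int => x), ?_⟩, ?_⟩
            · rw [List.pairwise_replicate]
              right; exact le_refl p
            · intro x hx y hy
              have hx' : x = p := List.eq_of_mem_replicate hx
              exact le_of_lt (hx' ▸ hgtmem y hy)
            · intro x hx y hy
              rcases List.mem_append.mp hy with hy | hy
              · exact le_of_lt (lt_of_lt_of_le (hltmem x hx)
                  (le_of_eq (List.eq_of_mem_replicate hy).symm))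
              · exact le_of_lt (lt_trans (hltmem x hx) (hgtmem y hy))
        rw [hsplit]
        have hlenSL : (PySem.List.sorted lt (fun x => x) false).length = lt.length :=
          PySem.List.length_sorted _ _ _
        have heNpos : 0 < eN := List.count_pos_iff.mpr hpmem
        have hltN : lt.length ≤ N := by omega
        have hgtN : gt.length ≤ N := by omega
        have hsumSL : (PySem.List.sorted lt (fun x => x) false).sum = lt.sum :=
          (PySem.List.sorted_perm lt (fun x => x) false).sum_eq
        by_cases hbr1 : m ≤ (lt.length : Int)
        · rw [if_pos hbr1]
          rw [List.take_append_of_le_length (by rw [hlenSL]; omega)]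
          exact ih lt hltN m
        · rw [if_neg hbr1]
          have htake1 : (PySem.List.sorted lt (fun x => x) false
                ++ (List.replicate eN p ++ PySem.List.sorted gt (fun x => x) false)).take m.toNat
              = PySem.List.sorted lt (fun x => x) false
                ++ (List.replicate eN p
                    ++ PySem.List.sorted gt (fun x => x) false).take (m.toNat - lt.length) := by
            rw [List.take_append, List.take_of_length_le (by rw [hlenSL]; omega), hlenSL]
          by_cases hbr2 : m ≤ (lt.length : Int) + ((L.length : Int) - (lt.length : Int) - (gt.length : Int))
          · rw [if_pos hbr2]
            have hmn : m.toNat - lt.length ≤ eN := by omega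
            rw [htake1, List.take_append_of_le_length (by rw [List.length_replicate]; omega),
              List.take_replicate, Nat.min_eq_left hmn]
            rw [List.sum_append, hsumSL, List.sum_replicate, nsmul_eq_mul]
            have : ((m.toNat - lt.length : Nat) : Int) = m - (lt.length : Int) := by omega
            rw [this]
            ring
          · rw [if_neg hbr2]
            rw [htake1, List.take_append, List.length_replicate,
              List.take_of_length_le (show (List.replicate eN p).length ≤ m.toNat - lt.length by
                rw [List.length_replicate]; omega)]
            rw [List.sum_append, List.sum_append, hsumSL, List.sum_replicate, nsmul_eq_mul]
            rw [ih gt hgtN (m - (lt.length : Int) - ((L.length : Int) - (lt.length : Int) - (gt.length : Int)))]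
            have hcast : (m - (lt.length : Int) - ((L.length : Int) - (lt.length : Int) - (gt.length : Int))).toNat
                = m.toNat - lt.length - eN := by omega
            rw [hcast]
            have hcast2 : ((L.length : Int) - (lt.length : Int) - (gt.length : Int)) = (eN : Int) := by omega
            rw [hcast2]
            ring

-- B evaluates to the normal form (no precondition: B is total)
lemma B_val (n k : Int) (a b : List Int) :
    dishonest_sellers_alt n k a b = pvNF n k a b := by
  show pvBsum n b + dsSelSum (pvDiffList n a b)
      (max k (((pvDiffList n a b).countP (fun d => decide (d ≤ 0)) : Nat) : Int)) = pvNF n k a b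
  rw [dsSelSum_eq (pvDiffList n a b).length (pvDiffList n a b) le_rfl]
  have hcnt : (pvNonpos n a b).length = (pvDiffList n a b).countP (fun d => decide (d ≤ 0)) := by
    unfold pvNonpos
    rw [← List.countP_eq_length_filter]
  have hm : (max k (((pvDiffList n a b).countP (fun d => decide (d ≤ 0)) : Nat) : Int)).toNat
      = pvM n k a b := by
    unfold pvM
    rw [hcnt]
    omega
  rw [hm]
  rfl

-- A on the degenerate inputs n ≤ k ≤ 0: every loop is empty
lemma A_deg (n k : Int) (a b : List Int) (hn : n ≤ 0) (hnk : n ≤ k) (hk : k ≤ 0) :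
    dishonest_sellers n k a b = 0 := by
  have h1 : PySem.List.pyRange 0 n 1 = [] := PySem.List.pyRange_one_eq_nil hn
  have h2 : PySem.List.pyRange 0 k 1 = [] := PySem.List.pyRange_one_eq_nil hk
  have h3 : (n - k).toNat = 0 := by omega
  simp only [dishonest_sellers, h1, h2, h3, List.foldl_nil, dsWhile]
  rw [PySem.List.pyRange_one_eq_nil hnk, List.foldl_nil]

-- the normal form vanishes on the degenerate inputs n ≤ 0
lemma pvNF_deg (n k : Int) (a b : List Int) (hn : n ≤ 0) :
    pvNF n k a b = 0 := by
  have h1 : PySem.List.pyRange 0 n 1 = [] := PySem.List.pyRange_one_eq_nil hn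
  unfold pvNF pvBsum pvDiffList
  rw [h1]
  simp [PySem.List.sorted]

-- ===== VERDICT (by name: the statements are the Claim_ definitions above) =====
theorem dishonest_sellers_spec : Claim_unchanged_dishonest_sellers := by
  intro n k a b _hDom hPre
  unfold Spec_dishonest_sellers
  intro hnD
  unfold Pre_dishonest_sellers at hPre
  unfold D_dishonest_sellers at hnD
  push_neg at hnD
  by_cases hn : 0 < n
  · have hk0 : 0 ≤ k := hnD hn
    rcases hPre with ⟨-, hna, hnb, -, hk2⟩ | ⟨hn', -, -⟩
    · exact (A_val n k a b hk0 hk2 hna hnb).trans (B_val n k a b).symm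
    · omega
  · push_neg at hn
    have hdeg : n ≤ k ∧ k ≤ 0 := by
      rcases hPre with ⟨h1, -⟩ | ⟨-, h2, h3⟩
      · omega
      · exact ⟨h2, h3⟩
    rw [A_deg n k a b hn hdeg.1 hdeg.2, B_val n k a b, pvNF_deg n k a b hn]

theorem dishonest_sellers_changed : Claim_changed_dishonest_sellers := by
  unfold Claim_changed_dishonest_sellers
  refine ⟨by decide, by decide, by decide, by decide, ?_, by decide⟩
  show dishonest_sellers_alt 2 (-1) [5, 3] [4, 1] = 5
  rw [B_val]
  decide
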